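-- pv_equiv track=rewrite | github.com/craygore1/F1_elo | racemodule.py | race_to_h2h_team
-- ===== SOURCE A (Python) =====
-- def race_to_h2h_team(results):
--     """
--     Converts a race result list into head-to-head vectors (omits teammates).
--
--     Parameters:
--         results: A list that represents a single race's finish order.
--                                  E.g., ["john", "matt", "bob"]
--         teams: A corresponding list of teams for each of the drivers also in finishing order.
--
--     Returns:
--         dict: A dictionary where the key is the participant and the value is the head-to-head vector.
--     """
--     # Step 1: Gather all unique participants
--     participant_idx = {participant: idx for idx, participant in enumerate(results)}
--
--     # Step 2: Create a dictionary to store head-to-head vectors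
--     head_to_head_vectors = {participant: [0] * (len(results) - 1) for participant in results}
--
--
--     # Step 3: Update head-to-head vectors based on person results
--     for i, driver in enumerate(participant_idx):
--         current_participant = driver
--         for j in range(i, len(results)-1):
--             head_to_head_vectors[current_participant][j] = 1
--
--     return head_to_head_vectors
-- ===== SOURCE B (Python) =====
-- def race_to_h2h_team(results):
--     # Single left-to-right pass: maintain the current row; each newly seen
--     # driver records a copy of it, then one cell is flipped 1 -> 0 in place.
--     out = {}
--     row = [1] * (len(results) - 1)
--     i = 0
--     for p in results:
--         if p not in out:
--             out[p] = row.copy()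
--             if i < len(row):
--                 row[i] = 0
--             i += 1
--     return out
-- ===== Notes on version B (the rewrite author's own statement) =====
-- stated objective: alternative
-- what changed: B is a single streaming pass over the finish list: it maintains one current row, emits a copy of it for each first-seen driver, and derives the next row from the previous by flipping exactly one cell 1->0 in place, replacing A's two pre-built dicts and nested index-range fill loop.
import Mathlib
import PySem

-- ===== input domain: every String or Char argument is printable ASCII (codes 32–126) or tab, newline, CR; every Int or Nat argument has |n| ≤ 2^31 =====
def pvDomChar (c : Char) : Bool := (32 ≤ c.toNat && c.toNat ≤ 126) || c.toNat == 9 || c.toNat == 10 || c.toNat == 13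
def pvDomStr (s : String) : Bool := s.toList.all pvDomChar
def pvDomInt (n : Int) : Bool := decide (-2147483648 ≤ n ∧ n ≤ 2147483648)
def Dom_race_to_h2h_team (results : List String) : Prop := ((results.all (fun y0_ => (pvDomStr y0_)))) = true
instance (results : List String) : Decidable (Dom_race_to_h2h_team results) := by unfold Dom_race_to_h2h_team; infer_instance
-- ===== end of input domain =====

-- B replaces A's two pre-built dicts and nested index-range fill loop by one streaming pass
-- that maintains a single current row, emits a copy per first-seen driver, and flips one cell
-- 1 -> 0 in place to obtain the next row (objective: alternative, same cost — output is O(n^2)).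

-- ===== PORT A =====
def race_to_h2h_team (results : List String) : List (String × List Int) :=
  -- Step 1: participant -> idx dict (later duplicates overwrite the value, key keeps first position)
  let participant_idx : PySem.Dict String Int :=
    (PySem.List.enumerate results).foldl (fun d p => d.insert p.2 p.1) PySem.Dict.empty
  -- Step 2: participant -> [0] * (len(results) - 1)
  let h0 : PySem.Dict String (List Int) :=
    results.foldl (fun d p => d.insert p (List.replicate (results.length - 1) (0 : Int))) PySem.Dict.empty
  -- Step 3: for i, driver in enumerate(participant_idx): for j in range(i, len(results)-1): hv[driver][j] = 1
  let hv : PySem.Dict String (List Int) :=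
    (PySem.List.enumerate participant_idx.keys).foldl
      (fun d ip =>
        (PySem.List.pyRange ip.1 ((results.length : Int) - 1) 1).foldl
          (fun d j => d.modify ip.2 [] (fun row => row.set j.toNat 1)) d)
      h0
  hv.items

-- ===== PORT B =====
-- out = {}; row = [1]*(len(results)-1); i = 0
-- for p in results: if p not in out: out[p] = row.copy(); if i < len(row): row[i] = 0; i += 1
def race_to_h2h_team_alt (results : List String) : List (String × List Int) :=
  let st := results.foldl
    (fun (st : PySem.Dict String (List Int) × List Int × Int) p =>
      if st.1.contains p then st
      else
        (st.1.insert p st.2.1,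
         (if st.2.2 < PySem.List.len st.2.1 then st.2.1.set st.2.2.toNat 0 else st.2.1),
         st.2.2 + 1))
    (PySem.Dict.empty, List.replicate (results.length - 1) (1 : Int), (0 : Int))
  st.1.items

-- ===== PRECONDITION & SPEC =====
def Spec_race_to_h2h_team (results : List String) (out : List (String × List Int)) : Prop := out = race_to_h2h_team_alt results
instance (results : List String) (out : List (String × List Int)) : Decidable (Spec_race_to_h2h_team results out) := by unfold Spec_race_to_h2h_team; infer_instance

-- ===== CLAIM (what is proved, stated in full; the proofs are below) =====
def Claim_equal_race_to_h2h_team : Prop := ∀ (results : List String), Dom_race_to_h2h_team results → Spec_race_to_h2h_team results (race_to_h2h_team results)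

-- ===== LEMMAS AND PROOFS =====

-- the common closed form both ports are reduced to
def closedForm (results : List String) : List (String × List Int) :=
  (PySem.List.enumerate (PySem.List.dedup results)).map
    (fun ip => (ip.2, List.replicate ip.1.toNat (0 : Int) ++ List.replicate (results.length - 1 - ip.1.toNat) (1 : Int)))

-- a Python range with an empty span is empty
lemma pyRange_nil (a b : Int) (h : b ≤ a) : PySem.List.pyRange a b 1 = [] := by
  simp [PySem.List.pyRange]; intro h2; omega

-- the inner 'for j' loop of A touches only key p: its effect on getD collapses to a fold on the row
lemma inner_getD (js : List Int) (p : String) :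
    ∀ (d : PySem.Dict String (List Int)) (q : String),
    ((js.foldl (fun d j => d.modify p [] (fun row => row.set j.toNat 1)) d).getD q []) =
      if q = p then js.foldl (fun row j => row.set j.toNat 1) (d.getD p []) else d.getD q [] := by
  induction js with
  | nil => intro d q; by_cases hq : q = p <;> simp [hq]
  | cons j t ih =>
      intro d q
      simp only [List.foldl_cons, ih, PySem.Dict.getD_modify]
      by_cases hq : q = p <;> simp [hq]

-- the inner loop keeps the key set unchanged when p is already a key
lemma inner_keys (js : List Int) (p : String) :
    ∀ (d : PySem.Dict String (List Int)), d.contains p = true →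
    ((js.foldl (fun d j => d.modify p [] (fun row => row.set j.toNat 1)) d).keys) = d.keys := by
  induction js with
  | nil => intro d _; rfl
  | cons j t ih =>
      intro d hp
      simp only [List.foldl_cons]
      rw [ih _ (by simp [PySem.Dict.contains_modify, hp]),
          PySem.Dict.keys_modify, PySem.Dict.keys_insert_of_contains _ _ hp]

-- shorthand for A's outer-loop step and the row effect of one iteration
def stepA (n : Nat) (d : PySem.Dict String (List Int)) (ip : Int × String) : PySem.Dict String (List Int) :=
  (PySem.List.pyRange ip.1 ((n : Int) - 1) 1).foldl
    (fun d j => d.modify ip.2 [] (fun row => row.set j.toNat 1)) d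

def rowA (n : Nat) (i : Int) (r : List Int) : List Int :=
  (PySem.List.pyRange i ((n : Int) - 1) 1).foldl (fun row j => row.set j.toNat 1) r

lemma stepA_getD (n : Nat) (d : PySem.Dict String (List Int)) (ip : Int × String) (q : String) :
    (stepA n d ip).getD q [] = if q = ip.2 then rowA n ip.1 (d.getD ip.2 []) else d.getD q [] := by
  simpa [stepA, rowA] using inner_getD (PySem.List.pyRange ip.1 ((n : Int) - 1) 1) ip.2 d q

-- outer loop leaves keys it never writes untouched
lemma outer_getD_not_mem (n : Nat) (l : List (Int × String)) :
    ∀ (d : PySem.Dict String (List Int)) (q : String), q ∉ l.map (·.2) →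
    (l.foldl (stepA n) d).getD q [] = d.getD q [] := by
  induction l with
  | nil => intro d q _; rfl
  | cons ip t ih =>
      intro d q hq
      simp only [List.map_cons, List.mem_cons] at hq
      rw [not_or] at hq
      simp only [List.foldl_cons, ih _ _ hq.2, stepA_getD, if_neg hq.1]

-- outer loop with pairwise-distinct keys: each key's final row is its single iteration's effect
lemma outer_getD (n : Nat) (l : List (Int × String)) (hnd : (l.map (·.2)).Nodup) :
    ∀ (d : PySem.Dict String (List Int)), ∀ ip ∈ l,
    (l.foldl (stepA n) d).getD ip.2 [] = rowA n ip.1 (d.getD ip.2 []) := by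
  induction l with
  | nil => intro d ip h; cases h
  | cons hd t ih =>
      intro d ip hip
      simp only [List.map_cons, List.nodup_cons] at hnd
      simp only [List.foldl_cons]
      cases hip with
      | head => rw [outer_getD_not_mem n t (stepA n d hd) hd.2 hnd.1, stepA_getD, if_pos rfl]
      | tail _ hip =>
          rw [ih hnd.2 _ ip hip, stepA_getD,
            if_neg (by intro h; exact hnd.1 (h ▸ List.mem_map_of_mem hip))]

-- outer loop preserves the key set when every written key is present
lemma outer_keys (n : Nat) (l : List (Int × String)) :
    ∀ (d : PySem.Dict String (List Int)), (∀ ip ∈ l, ip.2 ∈ d.keys) →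
    (l.foldl (stepA n) d).keys = d.keys := by
  induction l with
  | nil => intro d _; rfl
  | cons hd t ih =>
      intro d h
      have hk : (stepA n d hd).keys = d.keys := by
        exact inner_keys _ _ _ ((PySem.Dict.contains_iff_mem_keys d hd.2).2 (h hd (by simp)))
      simp only [List.foldl_cons]
      rw [ih (stepA n d hd) (fun ip hip => hk ▸ h ip (List.mem_cons_of_mem _ hip)), hk]

-- inserting the same constant row for every listed key
lemma h0_getD (c : List Int) (l : List String) :
    ∀ (d : PySem.Dict String (List Int)) (q : String),
    (l.foldl (fun d p => d.insert p c) d).getD q [] = if q ∈ l then c else d.getD q [] := by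
  induction l with
  | nil => intro d q; simp
  | cons h t ih =>
      intro d q
      simp only [List.foldl_cons, ih, PySem.Dict.getD_insert]
      by_cases h1 : q ∈ t <;> by_cases h2 : q = h <;> simp [h1, h2]

-- closed form of the row after setting indices i..m-1 to 1
lemma setRange_closed : ∀ (k i m : Nat), m - i = k → i ≤ m → ∀ pre : List Int, pre.length = i →
    (PySem.List.pyRange (i : Int) (m : Int) 1).foldl (fun row j => row.set j.toNat 1)
        (pre ++ List.replicate (m - i) (0 : Int))
      = pre ++ List.replicate (m - i) (1 : Int) := by
  intro k
  induction k with
  | zero =>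
      intro i m hk hi pre hpre
      have : i = m := by omega
      subst this
      rw [pyRange_nil _ _ le_rfl]
      simp
  | succ k ih =>
      intro i m hk hi pre hpre
      have him : i < m := by omega
      rw [PySem.List.pyRange_one_cons (by exact_mod_cast him)]
      simp only [List.foldl_cons]
      have hset : (pre ++ List.replicate (m - i) (0 : Int)).set ((i : Int)).toNat 1
          = (pre ++ [(1 : Int)]) ++ List.replicate (m - (i + 1)) (0 : Int) := by
        have hrep : List.replicate (m - i) (0 : Int) = 0 :: List.replicate (m - (i + 1)) (0 : Int) := by
          have : m - i = (m - (i + 1)) + 1 := by omega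
          rw [this, List.replicate_succ]
        rw [List.set_append, if_neg (by simp [hpre]), hrep]
        simp [hpre]
      rw [hset]
      have hcast : (i : Int) + 1 = ((i + 1 : Nat) : Int) := by push_cast; ring
      rw [hcast, ih (i + 1) m (by omega) (by omega) (pre ++ [(1 : Int)]) (by simp [hpre])]
      have : m - i = (m - (i + 1)) + 1 := by omega
      rw [this, List.replicate_succ]
      simp

-- rowA on the all-zero row gives the closed-form row
lemma rowA_closed (n i : Nat) (hn : 1 ≤ n) (hi : i ≤ n - 1) :
    rowA n (i : Int) (List.replicate (n - 1) (0 : Int))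
      = List.replicate i (0 : Int) ++ List.replicate (n - 1 - i) (1 : Int) := by
  have hb : ((n : Int) - 1) = ((n - 1 : Nat) : Int) := by omega
  have hrep : List.replicate (n - 1) (0 : Int)
      = List.replicate i (0 : Int) ++ List.replicate (n - 1 - i) (0 : Int) := by
    rw [← List.replicate_add]
    congr 1
    omega
  rw [rowA, hb, hrep]
  exact setRange_closed (n - 1 - i) i (n - 1) rfl hi _ (by simp)

-- keys of A's participant_idx dict are the ordered dedup of results
lemma pidx_keys (results : List String) :
    ((PySem.List.enumerate results).foldl
        (fun (d : PySem.Dict String Int) p => d.insert p.2 p.1) PySem.Dict.empty).keys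
      = PySem.Set.ofList results := by
  have h := PySem.Dict.keys_foldl_insert_key (ν := Int) (PySem.List.enumerate results)
    (fun p => p.2) (fun _ p => p.1) PySem.Dict.empty
  rw [PySem.List.map_snd_enumerate, PySem.Dict.keys_empty] at h
  exact h

-- keys of A's zero-row dict are the ordered dedup of results
lemma h0_keys (results : List String) :
    (results.foldl
        (fun (d : PySem.Dict String (List Int)) p =>
          d.insert p (List.replicate (results.length - 1) (0 : Int))) PySem.Dict.empty).keys
      = PySem.Set.ofList results := by
  rw [PySem.Dict.keys_foldl_insert _ (fun _ _ => List.replicate (results.length - 1) (0 : Int)),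
    PySem.Dict.keys_empty]
  rfl

-- A equals the closed form
lemma A_closed (results : List String) : race_to_h2h_team results = closedForm results := by
  unfold race_to_h2h_team closedForm
  simp only []
  set n := results.length with hn
  set order := PySem.List.dedup results with horder
  have horder' : order = PySem.Set.ofList results := PySem.List.dedup_eq_ofList results
  have hndorder : order.Nodup := horder' ▸ PySem.Set.nodup_ofList results
  set h0 : PySem.Dict String (List Int) :=
    results.foldl (fun d p => d.insert p (List.replicate (n - 1) (0 : Int))) PySem.Dict.empty with hh0
  have hh0keys : h0.keys = order := by rw [hh0, h0_keys, horder']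
  set l := PySem.List.enumerate
      ((PySem.List.enumerate results).foldl
        (fun (d : PySem.Dict String Int) p => d.insert p.2 p.1) PySem.Dict.empty).keys with hl
  have hlo : l = PySem.List.enumerate order := by rw [hl, pidx_keys, horder']
  have hfold : (l.foldl
      (fun d ip =>
        (PySem.List.pyRange ip.1 ((n : Int) - 1) 1).foldl
          (fun d j => d.modify ip.2 [] (fun row => row.set j.toNat 1)) d) h0)
    = l.foldl (stepA n) h0 := rfl
  rw [hfold, hlo]
  have hmemkeys : ∀ ip ∈ PySem.List.enumerate order, ip.2 ∈ h0.keys := by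
    intro ip hip
    rw [hh0keys]
    have := List.mem_map_of_mem (f := (·.2)) hip
    rwa [PySem.List.map_snd_enumerate] at this
  have hkeys : ((PySem.List.enumerate order).foldl (stepA n) h0).keys = order := by
    rw [outer_keys n _ h0 hmemkeys, hh0keys]
  have hndmap : ((PySem.List.enumerate order).map (·.2)).Nodup := by
    rwa [PySem.List.map_snd_enumerate]
  have hndkeys : ((PySem.List.enumerate order).foldl (stepA n) h0).keys.Nodup := by
    rw [hkeys]; exact hndorder
  rw [PySem.Dict.items_eq_map_keys _ hndkeys [], hkeys]
  apply List.ext_getElem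
  · simp [PySem.List.length_enumerate]
  · intro t h1 h2
    have ht : t < order.length := by simpa using h1
    have hte : (PySem.List.enumerate order)[t]'(by
        rw [PySem.List.length_enumerate]; exact ht) = ((t : Int), order[t]) := by
      simpa using PySem.List.getElem_enumerate order 0 t (by rwa [PySem.List.length_enumerate])
    have hmem : ((t : Int), order[t]) ∈ PySem.List.enumerate order := by
      rw [← hte]; exact List.getElem_mem _
    have hgetD := outer_getD n (PySem.List.enumerate order) hndmap h0 _ hmem
    have hmemres : order[t] ∈ results := by
      have h' : order[t] ∈ order := List.getElem_mem _
      exact (PySem.List.mem_dedup results order[t]).1 h'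
    have hh0getD : h0.getD order[t] [] = List.replicate (n - 1) (0 : Int) := by
      rw [hh0, h0_getD, if_pos hmemres]
    have hlen : order.length ≤ n := by
      rw [hn, horder']
      exact PySem.Set.length_ofList_le results
    have hn1 : 1 ≤ n := by
      have : 0 < results.length := List.length_pos_of_mem hmemres
      omega
    have hrow := rowA_closed n t hn1 (by omega)
    simp only [List.getElem_map, hte]
    rw [hgetD, hh0getD, hrow]
    simp

-- ----- B side -----

-- B's loop body, named
def stepB (st : PySem.Dict String (List Int) × List Int × Int) (p : String) :
    PySem.Dict String (List Int) × List Int × Int :=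
  if st.1.contains p then st
  else
    (st.1.insert p st.2.1,
     (if st.2.2 < PySem.List.len st.2.1 then st.2.1.set st.2.2.toNat 0 else st.2.1),
     st.2.2 + 1)

-- the row held by B after m distinct drivers have been processed
def rowState (n m : Nat) : List Int :=
  List.replicate (min m (n - 1)) (0 : Int) ++ List.replicate (n - 1 - m) (1 : Int)

lemma rowState_length (n m : Nat) : (rowState n m).length = n - 1 := by
  simp [rowState]; omega

-- the keys B will newly insert while scanning xs, given it already holds ks
def newKeys : List String → List String → List String
  | _, [] => []
  | ks, p :: t => if p ∈ ks then newKeys ks t else p :: newKeys (ks ++ [p]) t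

-- the (key, row) pairs B emits for those keys, starting at distinct-count m
def emitRows (n : Nat) : Nat → List String → List (String × List Int)
  | _, [] => []
  | m, p :: t => (p, rowState n m) :: emitRows n (m + 1) t

lemma emitRows_map_fst (n : Nat) : ∀ (ps : List String) (m : Nat), (emitRows n m ps).map (·.1) = ps := by
  intro ps
  induction ps with
  | nil => intro m; rfl
  | cons p t ih => intro m; simp [emitRows, ih]

-- flipping cell m of the current row yields the next row state
lemma rowState_succ (n m : Nat) :
    (if (m : Int) < PySem.List.len (rowState n m) then (rowState n m).set ((m : Int)).toNat 0
     else rowState n m) = rowState n (m + 1) := by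
  rw [PySem.List.len_eq, rowState_length]
  rcases Nat.lt_or_ge m (n - 1) with hm | hm
  · rw [if_pos (by exact_mod_cast hm)]
    have h1 : min m (n - 1) = m := by omega
    have h2 : min (m + 1) (n - 1) = m + 1 := by omega
    have h3 : n - 1 - m = (n - 1 - (m + 1)) + 1 := by omega
    calc (rowState n m).set ((m : Int)).toNat 0
        = (List.replicate m (0 : Int) ++ (1 :: List.replicate (n - 1 - (m + 1)) (1 : Int))).set m 0 := by
          simp only [rowState, h1, h3, List.replicate_succ, Int.toNat_natCast]
      _ = List.replicate m (0 : Int) ++ (0 :: List.replicate (n - 1 - (m + 1)) (1 : Int)) := by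
          rw [List.set_append]
          simp
      _ = rowState n (m + 1) := by
          simp only [rowState, h2]
          rw [List.replicate_succ']
          simp
  · rw [if_neg (by exact_mod_cast Nat.not_lt.mpr hm)]
    have h1 : min m (n - 1) = n - 1 := by omega
    have h2 : min (m + 1) (n - 1) = n - 1 := by omega
    have h3 : n - 1 - m = 0 := by omega
    have h4 : n - 1 - (m + 1) = 0 := by omega
    simp [rowState, h1, h2, h3, h4]

-- newKeys from an empty key set is the ordered dedup
lemma append_newKeys : ∀ (xs ks : List String), ks ++ newKeys ks xs = PySem.Set.update ks xs := by
  intro xs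
  induction xs with
  | nil => intro ks; simp [newKeys, PySem.Set.update]
  | cons p t ih =>
      intro ks
      rw [PySem.Set.update_cons]
      by_cases hp : p ∈ ks
      · rw [PySem.Set.add_of_mem hp]
        simpa [newKeys, hp] using ih ks
      · rw [PySem.Set.add_of_not_mem hp]
        simpa [newKeys, hp] using ih (ks ++ [p])

lemma newKeys_nil (xs : List String) : newKeys [] xs = PySem.Set.ofList xs := by
  have := append_newKeys xs []
  simpa [PySem.Set.update_nil_left] using this

-- the main invariant of B's single pass
lemma B_inv (n : Nat) : ∀ (xs : List String) (out : PySem.Dict String (List Int)) (m : Nat),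
    xs.foldl stepB (out, rowState n m, ((m : Nat) : Int)) =
      ((emitRows n m (newKeys out.keys xs)).foldl (fun d pr => d.insert pr.1 pr.2) out,
       rowState n (m + (newKeys out.keys xs).length),
       ((m + (newKeys out.keys xs).length : Nat) : Int)) := by
  intro xs
  induction xs with
  | nil => intro out m; simp [newKeys, emitRows]
  | cons p t ih =>
      intro out m
      by_cases hp : p ∈ out.keys
      · have hc : out.contains p = true := (PySem.Dict.contains_iff_mem_keys out p).2 hp
        simp only [List.foldl_cons, stepB, hc, if_pos]
        rw [ih out m]
        simp [newKeys, hp]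
      · have hc : out.contains p = false := by
          by_contra h
          exact hp ((PySem.Dict.contains_iff_mem_keys out p).1 (by simpa using h))
        simp only [List.foldl_cons, stepB, hc, Bool.false_eq_true, if_neg, not_false_iff]
        have hrow := rowState_succ n m
        have hi : ((m : Nat) : Int) + 1 = (((m + 1 : Nat)) : Int) := by push_cast; ring
        rw [hrow, hi, ih (out.insert p (rowState n m)) (m + 1)]
        have hkeys : (out.insert p (rowState n m)).keys = out.keys ++ [p] :=
          PySem.Dict.keys_insert_of_not_contains _ _ hc
        rw [hkeys]
        simp only [newKeys, hp, if_neg, not_false_iff, emitRows, List.foldl_cons, List.length_cons]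
        refine congrArg₂ _ rfl (congrArg₂ _ ?_ ?_)
        · congr 1; omega
        · congr 1; omega

-- B equals the closed form
lemma emitRows_eq (n : Nat) : ∀ (ps : List String) (m : Nat), m + ps.length ≤ n →
    emitRows n m ps = (PySem.List.enumerate ps (m : Int)).map
      (fun ip => (ip.2, List.replicate ip.1.toNat (0 : Int) ++ List.replicate (n - 1 - ip.1.toNat) (1 : Int))) := by
  intro ps
  induction ps with
  | nil => intro m _; rfl
  | cons p t ih =>
      intro m hm
      simp only [List.length_cons] at hm
      rw [PySem.List.enumerate_cons]
      have hmin : min m (n - 1) = m := by omega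
      have hi : (m : Int) + 1 = (((m + 1 : Nat)) : Int) := by push_cast; ring
      simp only [emitRows, List.map_cons, rowState, hmin, Int.toNat_natCast, hi,
        ih (m + 1) (by omega)]

lemma B_closed (results : List String) : race_to_h2h_team_alt results = closedForm results := by
  have hstep : race_to_h2h_team_alt results
      = ((results.foldl stepB
          (PySem.Dict.empty, rowState results.length 0, ((0 : Nat) : Int))).1).items := by
    unfold race_to_h2h_team_alt stepB
    simp [rowState]
  rw [hstep, B_inv, PySem.Dict.keys_empty, newKeys_nil]
  dsimp only
  have hnd : ((emitRows results.length 0 (PySem.Set.ofList results)).map (·.1)).Nodup := by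
    rw [emitRows_map_fst]; exact PySem.Set.nodup_ofList results
  rw [PySem.Dict.items_foldl_insert_fresh (emitRows results.length 0 (PySem.Set.ofList results))
      Prod.fst Prod.snd PySem.Dict.empty (fun a _ => PySem.Dict.contains_empty a.1) hnd]
  simp only [PySem.Dict.empty, List.nil_append]
  rw [emitRows_eq results.length _ 0 (by simpa using PySem.Set.length_ofList_le results)]
  simp [closedForm]

-- ===== VERDICT (by name: the statement is the Claim_ definition above) =====
theorem race_to_h2h_team_spec : Claim_equal_race_to_h2h_team := by
  intro results _
  exact (A_closed results).trans (B_closed results).symm
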